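-- pv_equiv track=rewrite | github.com/shakirali/vocabularyWizardAPI | scripts/examine_quiz_sentences_quality.py | is_age_appropriate
-- ===== SOURCE A (Python) =====
-- def is_age_appropriate(sentence: str, level: int) -> bool:
--     """Check if sentence is age-appropriate for the level"""
--     # Level 1: Ages 7-8 - simple sentences
--     # Level 2: Ages 8-9 - slightly more complex
--     # Level 3: Ages 9-10 - intermediate complexity
--     # Level 4: Ages 10-11 - advanced complexity
--
--     word_count = len(sentence.split())
--
--     if level == 1:
--         # Should be simple, under 15 words typically
--         if word_count > 18:
--             return False
--         # Check for complex structures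
--         if any(phrase in sentence.lower() for phrase in [
--             "despite", "although", "furthermore", "moreover", "consequently"
--         ]):
--             return False
--
--     elif level == 2:
--         if word_count > 22:
--             return False
--
--     elif level == 3:
--         if word_count > 25:
--             return False
--
--     # Level 4 can be more complex
--
--     return True
-- ===== SOURCE B (Python) =====
-- def is_age_appropriate(sentence: str, level: int) -> bool:
--     """Single character-level pass: count words at whitespace->nonspace
--     transitions (early exit when over the level's limit) and detect forbidden
--     phrases positionally, instead of split() plus per-phrase substring scans."""
--     limit = {1: 18, 2: 22, 3: 25}.get(level)
--     if limit is None: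
--         return True
--     banned = ("despite", "although", "furthermore", "moreover",
--               "consequently") if level == 1 else ()
--     low = sentence.lower()
--     words = 0
--     prev_space = True
--     for i, ch in enumerate(sentence):
--         if ch.isspace():
--             prev_space = True
--         else:
--             if prev_space:
--                 words += 1
--                 if words > limit:
--                     return False
--             prev_space = False
--         if low.startswith(banned, i):
--             return False
--     return True
-- ===== Notes on version B (the rewrite author's own statement) =====
-- stated objective: alternative
-- what changed: Replaces A's staged checks (split() to count all words, then per-phrase substring searches over the lowered sentence) by one character-level pass that counts whitespace->nonspace transitions with early exit once the level's limit is exceeded and detects forbidden phrases positionally via startswith at each index.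
import Mathlib
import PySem

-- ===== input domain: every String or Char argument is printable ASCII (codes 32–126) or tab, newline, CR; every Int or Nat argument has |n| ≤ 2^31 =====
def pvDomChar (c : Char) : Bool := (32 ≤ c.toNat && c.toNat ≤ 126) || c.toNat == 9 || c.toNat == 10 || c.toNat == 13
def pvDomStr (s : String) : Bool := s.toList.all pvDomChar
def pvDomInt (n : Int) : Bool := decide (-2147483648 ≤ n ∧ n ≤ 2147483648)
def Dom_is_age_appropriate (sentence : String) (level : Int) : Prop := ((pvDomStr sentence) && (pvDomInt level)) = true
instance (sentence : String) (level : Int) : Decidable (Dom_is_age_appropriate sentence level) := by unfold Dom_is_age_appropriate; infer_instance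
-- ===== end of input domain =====

-- B replaces A's staged split()+substring checks by one character-level pass
-- (transition word counting with early exit + positional phrase detection); alternative, same cost.

-- ===== PORT A =====
def is_age_appropriate (sentence : String) (level : Int) : Bool :=
  let word_count : Nat := (PySem.Str.split₀ sentence).length
  if level == 1 then
    if word_count > 18 then false
    else if ["despite", "although", "furthermore", "moreover", "consequently"].any
        (fun phrase => PySem.Str.isIn phrase (PySem.Str.lower sentence)) then false
    else true
  else if level == 2 then
    if word_count > 22 then false else true
  else if level == 3 then
    if word_count > 25 then false else true
  else true

-- ===== PORT B =====
-- the loop of Source B: scan the characters once; lw is the aligned suffix of the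
-- lowered sentence (low.startswith(p, i) = p is a prefix of lw)
def pvScan (banned : List (List Char)) (limit : Nat) :
    List Char → List Char → Nat → Bool → Bool
  | [], _, _, _ => true
  | c :: rest, lw, words, prev_space =>
    if PySem.Chars.isspace c then
      if banned.any (fun p => p.isPrefixOf lw) then false
      else pvScan banned limit rest lw.tail words true
    else
      let w := if prev_space then words + 1 else words
      if w > limit then false
      else if banned.any (fun p => p.isPrefixOf lw) then false
      else pvScan banned limit rest lw.tail w false

def pvLimits : PySem.Dict Int Nat :=
  ((PySem.Dict.empty.insert 1 18).insert 2 22).insert 3 25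

def is_age_appropriate_alt (sentence : String) (level : Int) : Bool :=
  match PySem.Dict.get? pvLimits level with
  | none => true
  | some limit =>
    let banned : List (List Char) :=
      if level == 1 then
        ["despite".toList, "although".toList, "furthermore".toList,
         "moreover".toList, "consequently".toList]
      else []
    let cs := sentence.toList
    pvScan banned limit cs (PySem.Chars.lower cs) 0 true

-- ===== PRECONDITION & SPEC =====
def Spec_is_age_appropriate (sentence : String) (level : Int) (out : Bool) : Prop := out = is_age_appropriate_alt sentence level
instance (sentence : String) (level : Int) (out : Bool) : Decidable (Spec_is_age_appropriate sentence level out) := by unfold Spec_is_age_appropriate; infer_instance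

-- ===== CLAIM =====
def Claim_equal_is_age_appropriate : Prop := ∀ (sentence : String) (level : Int), Dom_is_age_appropriate sentence level → Spec_is_age_appropriate sentence level (is_age_appropriate sentence level)

-- ===== LEMMAS AND PROOFS =====

-- words counted so far from scan state `prev_space` (true = not inside a word)
def pvCnt : Bool → List Char → Nat
  | _, [] => 0
  | prev, c :: rest =>
    if PySem.Chars.isspace c then pvCnt true rest
    else (if prev then 1 else 0) + pvCnt false rest

theorem pvGo_length (cs : List Char) : ∀ (cur : List Char) (acc : List (List Char)),
    (PySem.Chars.split₀.go cs cur acc).length =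
      acc.length + (if cur.isEmpty then 0 else 1) + pvCnt cur.isEmpty cs := by
  induction cs with
  | nil =>
    intro cur acc
    simp only [PySem.Chars.split₀.go, pvCnt]
    split_ifs <;> simp
  | cons c rest ih =>
    intro cur acc
    by_cases hc : PySem.Chars.isspace c = true
    · by_cases hcur : cur.isEmpty = true
      · simp [PySem.Chars.split₀.go, hc, hcur, ih, pvCnt]
      · simp [PySem.Chars.split₀.go, hc, hcur, ih, pvCnt]
    · simp only [PySem.Chars.split₀.go]
      rw [if_neg hc, ih]
      simp [pvCnt, hc]
      split_ifs <;> omega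

theorem pvWc_eq (s : String) :
    (PySem.Str.split₀ s).length = pvCnt true s.toList := by
  have h := congrArg List.length (PySem.Str.split₀_map_toList s)
  rw [List.length_map] at h
  rw [h, PySem.Chars.split₀, pvGo_length]
  simp

theorem pv_isIn_cons (p : List Char) (x : Char) (l : List Char) :
    PySem.Chars.isIn p (x :: l) = (p.isPrefixOf (x :: l) || PySem.Chars.isIn p l) := by
  by_cases h : p <:+: x :: l
  · rw [(PySem.Chars.isIn_iff_infix p (x :: l)).mpr h]
    rcases List.infix_cons_iff.mp h with hp | hs
    · simp [List.isPrefixOf_iff_prefix.mpr hp]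
    · simp [(PySem.Chars.isIn_iff_infix p l).mpr hs]
  · have h1 : PySem.Chars.isIn p (x :: l) = false := by
      cases hv : PySem.Chars.isIn p (x :: l)
      · rfl
      · exact absurd ((PySem.Chars.isIn_iff_infix p (x :: l)).mp hv) h
    have h2 : PySem.Chars.isIn p l = false := by
      cases hv : PySem.Chars.isIn p l
      · rfl
      · exact absurd (List.infix_cons_iff.mpr (Or.inr ((PySem.Chars.isIn_iff_infix p l).mp hv))) h
    have h3 : p.isPrefixOf (x :: l) = false := by
      cases hv : p.isPrefixOf (x :: l)
      · rfl
      · exact absurd (List.infix_cons_iff.mpr (Or.inl (List.isPrefixOf_iff_prefix.mp hv))) h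
    simp [h1, h2, h3]

theorem pv_isIn_nil (p : List Char) (hp : p ≠ []) : PySem.Chars.isIn p [] = false := by
  cases hv : PySem.Chars.isIn p []
  · rfl
  · exact absurd (List.eq_nil_of_infix_nil ((PySem.Chars.isIn_iff_infix p []).mp hv)) hp

theorem pvAny_cons (banned : List (List Char)) (x : Char) (ls : List Char) :
    (banned.any fun p => PySem.Chars.isIn p (x :: ls)) =
      ((banned.any fun p => p.isPrefixOf (x :: ls)) ||
        banned.any fun p => PySem.Chars.isIn p ls) := by
  induction banned with
  | nil => rfl
  | cons q qs ihq =>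
    rw [List.any_cons, List.any_cons, List.any_cons, pv_isIn_cons, ihq]
    cases q.isPrefixOf (x :: ls) <;> cases PySem.Chars.isIn q ls <;> simp

theorem pvScan_spec (banned : List (List Char)) (hb : ∀ p ∈ banned, p ≠ []) (limit : Nat)
    (cs : List Char) :
    ∀ (words : Nat) (prev : Bool), words ≤ limit →
      pvScan banned limit cs (PySem.Chars.lower cs) words prev =
        (decide (words + pvCnt prev cs ≤ limit) &&
          !(banned.any (fun p => PySem.Chars.isIn p (PySem.Chars.lower cs)))) := by
  induction cs with
  | nil =>
    intro words prev hw
    have hany : banned.any (fun p => PySem.Chars.isIn p (PySem.Chars.lower [])) = false := by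
      rw [List.any_eq_false]
      intro p hp
      simpa [PySem.Chars.lower] using pv_isIn_nil p (hb p hp)
    simp [pvScan, pvCnt, hany, hw]
  | cons c rest ih =>
    intro words prev hw
    have hlow : PySem.Chars.lower (c :: rest) =
        PySem.Chars.lowerChar c :: PySem.Chars.lower rest := by
      simp [PySem.Chars.lower]
    rw [hlow, pvAny_cons]
    by_cases hc : PySem.Chars.isspace c = true
    · have hcnt : pvCnt prev (c :: rest) = pvCnt true rest := by simp [pvCnt, hc]
      simp only [pvScan, hc, if_true, List.tail_cons, hcnt]
      by_cases hhit :
          (banned.any fun p => p.isPrefixOf (PySem.Chars.lowerChar c :: PySem.Chars.lower rest)) = true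
      · simp [hhit]
      · simp only [Bool.not_eq_true] at hhit
        rw [ih words true hw]
        simp [hhit]
    · have hcnt : words + pvCnt prev (c :: rest) =
          (if prev then words + 1 else words) + pvCnt false rest := by
        simp [pvCnt, hc]
        split_ifs <;> omega
      simp only [pvScan]
      rw [if_neg hc]
      by_cases hov : (if prev then words + 1 else words) > limit
      · rw [if_pos hov]
        have hno : ¬ (words + pvCnt prev (c :: rest) ≤ limit) := by omega
        simp [hno]
      · rw [if_neg hov]
        have hwle : (if prev then words + 1 else words) ≤ limit := by omega
        by_cases hhit :
            (banned.any fun p => p.isPrefixOf (PySem.Chars.lowerChar c :: PySem.Chars.lower rest)) = true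
        · rw [if_pos hhit]
          simp [hhit]
        · rw [if_neg hhit, List.tail_cons, ih _ false hwle]
          simp only [Bool.not_eq_true] at hhit
          simp [hhit, hcnt]

theorem pvLimits_get?_other (level : Int) (h1 : level ≠ 1) (h2 : level ≠ 2) (h3 : level ≠ 3) :
    PySem.Dict.get? pvLimits level = none := by
  simp only [pvLimits, PySem.Dict.get?, PySem.Dict.insert, PySem.Dict.empty]
  simp [Ne.symm h1, Ne.symm h2, Ne.symm h3]

-- ===== VERDICT =====
theorem is_age_appropriate_spec : Claim_equal_is_age_appropriate := by
  intro s level _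
  unfold Spec_is_age_appropriate is_age_appropriate is_age_appropriate_alt
  by_cases h1 : level = 1
  · subst h1
    have hget : PySem.Dict.get? pvLimits 1 = some 18 := by rfl
    rw [hget]
    have hb1 : ∀ p ∈ ["despite".toList, "although".toList, "furthermore".toList,
        "moreover".toList, "consequently".toList], p ≠ ([] : List Char) := by decide
    simp only [show ((1:Int) == 1) = true from rfl, if_true]
    rw [pvScan_spec _ hb1 18 s.toList 0 true (by omega), pvWc_eq s]
    simp only [List.any_cons, List.any_nil, PySem.Str.isIn_eq, PySem.Str.toList_lower]
    set n := pvCnt true s.toList with hn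
    by_cases hle : n ≤ 18
    · simp only [hle, Nat.zero_add, decide_true, Bool.true_and, show ¬ (n > 18) by omega, if_false]
      split_ifs with hX <;> simp_all
      intro hA hB hC hD
      rcases hX with h | h | h | h | h <;> simp_all
    · simp [show n > 18 by omega]
  · by_cases h2 : level = 2
    · subst h2
      have hget : PySem.Dict.get? pvLimits 2 = some 22 := by rfl
      rw [hget]
      have hb0 : ∀ p ∈ ([] : List (List Char)), p ≠ ([] : List Char) := by simp
      simp only [show ((2:Int) == 1) = false from rfl, show ((2:Int) == 2) = true from rfl,
        Bool.false_eq_true, if_false, if_true]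
      rw [pvScan_spec _ hb0 22 s.toList 0 true (by omega), pvWc_eq s]
      set n := pvCnt true s.toList with hn
      by_cases hle : n ≤ 22
      · simp [show ¬ (n > 22) by omega, hle]
      · simp [show n > 22 by omega]
    · by_cases h3 : level = 3
      · subst h3
        have hget : PySem.Dict.get? pvLimits 3 = some 25 := by rfl
        rw [hget]
        have hb0 : ∀ p ∈ ([] : List (List Char)), p ≠ ([] : List Char) := by simp
        simp only [show ((3:Int) == 1) = false from rfl, show ((3:Int) == 2) = false from rfl,
          show ((3:Int) == 3) = true from rfl, Bool.false_eq_true, if_false, if_true]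
        rw [pvScan_spec _ hb0 25 s.toList 0 true (by omega), pvWc_eq s]
        set n := pvCnt true s.toList with hn
        by_cases hle : n ≤ 25
        · simp [show ¬ (n > 25) by omega, hle]
        · simp [show n > 25 by omega]
      · rw [pvLimits_get?_other level h1 h2 h3]
        simp [h1, h2, h3]
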